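-- pv_equiv track=rewrite | github.com/alekssm/softuni_python_advanced | 7. multidimensional_lists_exe/eastern_bunny.py | get_up_eggs
-- ===== SOURCE A (Python) =====
-- def get_up_eggs(matrix, bunny):
--     eggs = 0
--     cells = []
--     br, cb = bunny  # starting row, column of the bunny
--     if br == 0:
--         pass
--     else:
--         for i in range(br - 1, -1, -1):
--             cell = matrix[i][cb]
--             if cell == "X":
--                 break
--             eggs += int(matrix[i][cb])
--             cells.append([i, cb])
--     return eggs, cells, "up"
-- ===== SOURCE B (Python) =====
-- def get_up_eggs(matrix, bunny):
--     br, cb = bunny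
--
--     def climb(i):
--         # eggs and cells for rows i, i-1, ... down to the first "X" (exclusive)
--         if i < 0:
--             return 0, []
--         cell = matrix[i][cb]
--         if cell == "X":
--             return 0, []
--         value = int(cell)
--         eggs, cells = climb(i - 1)
--         return value + eggs, [[i, cb]] + cells
--
--     eggs, cells = climb(br - 1)
--     return eggs, cells, "up"
-- ===== Notes on version B (the rewrite author's own statement) =====
-- stated objective: alternative
-- what changed: B replaces A's iterative loop with forward accumulators by a recursive descent climb(i) that builds the egg sum and the cell list back-to-front from the recursion's return values, with the stop conditions (i < 0, first 'X') as base cases; the br==0 special case disappears into the i < 0 base case.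
import Mathlib
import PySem

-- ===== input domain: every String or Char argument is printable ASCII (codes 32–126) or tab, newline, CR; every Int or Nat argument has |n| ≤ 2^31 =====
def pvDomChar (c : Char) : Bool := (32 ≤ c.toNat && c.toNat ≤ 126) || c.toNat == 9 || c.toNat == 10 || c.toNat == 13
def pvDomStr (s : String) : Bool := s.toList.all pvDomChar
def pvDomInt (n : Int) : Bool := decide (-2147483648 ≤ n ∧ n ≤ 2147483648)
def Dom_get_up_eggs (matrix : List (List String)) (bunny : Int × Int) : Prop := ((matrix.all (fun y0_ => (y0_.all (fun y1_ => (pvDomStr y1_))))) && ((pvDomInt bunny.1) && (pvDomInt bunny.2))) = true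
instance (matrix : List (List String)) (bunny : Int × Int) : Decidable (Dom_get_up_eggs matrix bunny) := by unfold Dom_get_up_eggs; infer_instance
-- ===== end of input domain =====

-- B is a recursive decomposition: climb(i) returns the egg sum and cell list for the run above, built back-to-front from return values (alternative, same cost).


-- shared by both ports and the precondition: matrix[i][cb] (Python indexing, none = IndexError)
def pvFetch (matrix : List (List String)) (cb i : Int) : Option String :=
  (PySem.List.pyGet? matrix i).bind (fun row => PySem.List.pyGet? row cb)

-- ===== PORT A =====
-- A's for-loop with break: eggs/cells forward accumulators; none-branches are the raise paths, excluded by Pre_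
def pvLoopA (matrix : List (List String)) (cb : Int) : List Int → Int → List (List Int) → Int × List (List Int)
  | [], eggs, cells => (eggs, cells)
  | i :: rest, eggs, cells =>
    match pvFetch matrix cb i with
    | none => (eggs, cells)          -- IndexError
    | some cell =>
      if cell = "X" then (eggs, cells)   -- break
      else
        match PySem.Int.ofStr? cell with
        | none => (eggs, cells)      -- ValueError
        | some v => pvLoopA matrix cb rest (eggs + v) (cells ++ [[i, cb]])

def get_up_eggs (matrix : List (List String)) (bunny : Int × Int) : Int × List (List Int) × String :=
  let eggs : Int := 0
  let cells : List (List Int) := []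
  let br := bunny.1
  let cb := bunny.2
  if br = 0 then (eggs, cells, "up")
  else
    let r := pvLoopA matrix cb (PySem.List.pyRange (br - 1) (-1) (-1)) eggs cells
    (r.1, r.2, "up")

-- ===== PORT B =====
-- B's recursive climb: results for rows i down to the first "X", built back-to-front; none-branches are the raise paths, excluded by Pre_
def pvClimb (matrix : List (List String)) (cb : Int) (i : Int) : Int × List (List Int) :=
  if h : i < 0 then (0, [])
  else
    match pvFetch matrix cb i with
    | none => (0, [])                -- IndexError
    | some cell =>
      if cell = "X" then (0, [])
      else
        match PySem.Int.ofStr? cell with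
        | none => (0, [])            -- ValueError
        | some v =>
          let r := pvClimb matrix cb (i - 1)
          (v + r.1, [i, cb] :: r.2)
termination_by (i + 1).toNat
decreasing_by omega

def get_up_eggs_alt (matrix : List (List String)) (bunny : Int × Int) : Int × List (List Int) × String :=
  let br := bunny.1
  let cb := bunny.2
  let r := pvClimb matrix cb (br - 1)
  (r.1, r.2, "up")

-- ===== PRECONDITION & SPEC =====
-- Pre_ excludes exactly the inputs on which Python A raises: a bunny row beyond the matrix
-- (IndexError) or a cell in the scanned pre-"X" run that is missing (IndexError) or not an
-- int literal (ValueError). (min clamps the range only so the condition is cheap to decide;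
-- under the first conjunct it is exactly A's scanned range.)
def Pre_get_up_eggs (matrix : List (List String)) (bunny : Int × Int) : Prop :=
  bunny.1 ≤ (matrix.length : Int) ∧
  ∀ c ∈ ((PySem.List.pyRange (min bunny.1 (matrix.length : Int) - 1) (-1) (-1)).map
          (pvFetch matrix bunny.2)).takeWhile (fun o => o ≠ some "X"),
    (c.bind PySem.Int.ofStr?).isSome
instance (matrix : List (List String)) (bunny : Int × Int) : Decidable (Pre_get_up_eggs matrix bunny) := by unfold Pre_get_up_eggs; infer_instance

def pvWitness_get_up_eggs : List (List String) × (Int × Int) := ([["1", "X"], ["2", "3"]], (2, 0))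

def Spec_get_up_eggs (matrix : List (List String)) (bunny : Int × Int) (out : Int × List (List Int) × String) : Prop := out = get_up_eggs_alt matrix bunny
instance (matrix : List (List String)) (bunny : Int × Int) (out : Int × List (List Int) × String) : Decidable (Spec_get_up_eggs matrix bunny out) := by unfold Spec_get_up_eggs; infer_instance

-- ===== CLAIM (what is proved, stated in full; the proofs are below) =====
def Claim_equal_get_up_eggs : Prop := ∀ (matrix : List (List String)) (bunny : Int × Int), Dom_get_up_eggs matrix bunny → Pre_get_up_eggs matrix bunny → Spec_get_up_eggs matrix bunny (get_up_eggs matrix bunny)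

-- ===== LEMMAS AND PROOFS =====

-- A's loop over the countdown range equals B's recursion, with the accumulators factored out.
-- (Both ports stop identically on every error branch, so no precondition is needed here.)
theorem pvMain (matrix : List (List String)) (cb : Int) :
    ∀ (n : Nat) (i : Int), (i + 1).toNat ≤ n → ∀ (eggs : Int) (cells : List (List Int)),
      pvLoopA matrix cb (PySem.List.pyRange i (-1) (-1)) eggs cells =
        (eggs + (pvClimb matrix cb i).1, cells ++ (pvClimb matrix cb i).2) := by
  intro n
  induction n with
  | zero =>
    intro i hi eggs cells
    have hneg : i < 0 := by omega
    rw [PySem.List.pyRange_neg_one_eq_nil (by omega : i ≤ -1), pvClimb]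
    simp [pvLoopA, hneg]
  | succ n ih =>
    intro i hi eggs cells
    by_cases hneg : i < 0
    · rw [PySem.List.pyRange_neg_one_eq_nil (by omega : i ≤ -1), pvClimb]
      simp [pvLoopA, hneg]
    · rw [PySem.List.pyRange_neg_one_cons (by omega : (-1 : Int) < i), pvClimb]
      simp only [pvLoopA, dif_neg hneg]
      cases hf : pvFetch matrix cb i with
      | none => simp
      | some cell =>
        by_cases hx : cell = "X"
        · simp [hx]
        · simp only [if_neg hx]
          cases hv : PySem.Int.ofStr? cell with
          | none => simp
          | some v =>
            dsimp only
            rw [ih (i - 1) (by omega) (eggs + v) (cells ++ [[i, cb]])]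
            simp only [Prod.mk.injEq]
            constructor
            · ring
            · simp

-- ===== VERDICT (by name: the statement is the Claim_ definition above) =====
theorem get_up_eggs_spec : Claim_equal_get_up_eggs := by
  intro matrix bunny _ _
  show get_up_eggs matrix bunny = get_up_eggs_alt matrix bunny
  have h0 : ∀ j : Int, j < 0 → pvClimb matrix bunny.2 j = (0, []) := by
    intro j hj; rw [pvClimb]; simp [hj]
  simp only [get_up_eggs, get_up_eggs_alt]
  by_cases hz : bunny.1 = 0
  · rw [if_pos hz, hz, h0 (0 - 1) (by norm_num)]
  · rw [if_neg hz,
      pvMain matrix bunny.2 (bunny.1 - 1 + 1).toNat (bunny.1 - 1) (le_refl _) 0 []]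
    simp
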